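-- pv_equiv track=rewrite | github.com/JewelIT/StockAnalysisHelper | tests/quick_conversation_test.py | check_for_loops
-- ===== SOURCE A (Python) =====
-- def check_for_loops(answer: str) -> bool:
--     """Check if response contains loop-generating phrases"""
--     loop_phrases = [
--         'would you like me to',
--         'ask me about',
--         'i can help you with',
--         'just ask',
--         'how can i help',
--         'want to know more'
--     ]
--     return any(phrase in answer.lower() for phrase in loop_phrases)
-- ===== SOURCE B (Python) =====
-- _LOOP_PHRASES = [
--     'would you like me to',
--     'ask me about',
--     'i can help you with',
--     'just ask',
--     'how can i help',
--     'want to know more'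
-- ]
--
-- def _build_trie(phrases):
--     root = {}
--     for p in phrases:
--         node = root
--         for c in p:
--             node = node.setdefault(c, {})
--         node['$'] = True  # terminal marker ('$' occurs in no phrase)
--     return root
--
-- _TRIE = _build_trie(_LOOP_PHRASES)
--
-- def check_for_loops(answer: str) -> bool:
--     """Check if response contains loop-generating phrases (shared prefix-tree walk)."""
--     s = answer.lower()
--     n = len(s)
--     for i in range(n + 1):
--         node = _TRIE
--         j = i
--         while True:
--             if '$' in node:
--                 return True
--             if j >= n:
--                 break
--             nxt = node.get(s[j])
--             if nxt is None:
--                 break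
--             node = nxt
--             j += 1
--     return False
-- ===== Notes on version B (the rewrite author's own statement) =====
-- stated objective: alternative
-- what changed: B builds a trie (prefix tree) of the six phrases once and, scanning the lowercased string, walks that shared tree from each position, replacing six independent substring scans with one data structure that checks all phrases simultaneously per position.
import Mathlib
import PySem

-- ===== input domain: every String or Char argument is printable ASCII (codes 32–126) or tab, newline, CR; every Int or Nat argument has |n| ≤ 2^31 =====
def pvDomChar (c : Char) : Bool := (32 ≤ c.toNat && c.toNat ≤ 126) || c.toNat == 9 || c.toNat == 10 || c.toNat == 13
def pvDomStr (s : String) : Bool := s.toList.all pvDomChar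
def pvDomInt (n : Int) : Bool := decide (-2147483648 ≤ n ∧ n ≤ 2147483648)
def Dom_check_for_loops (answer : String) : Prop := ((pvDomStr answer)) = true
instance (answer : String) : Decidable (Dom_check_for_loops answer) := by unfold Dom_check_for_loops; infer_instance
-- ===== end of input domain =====

-- B replaces A's six independent substring scans with a trie (prefix tree) of the phrases,
-- built once and walked from each position of the lowercased string; return values identical.

-- ===== PORT A =====
-- A: any(phrase in answer.lower() for phrase in loop_phrases)
def check_for_loops (answer : String) : Bool :=
  ["would you like me to",
   "ask me about",
   "i can help you with",
   "just ask",
   "how can i help",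
   "want to know more"].any (fun phrase => PySem.Str.isIn phrase (PySem.Str.lower answer))

-- ===== PORT B =====
-- trie of Source B: a dict-of-dicts; a node is (terminal flag '$', children), children are a
-- first-child/next-sibling list (single non-nested inductive): cons char termFlag childKids nextSibling
inductive Kids where
  | nil : Kids
  | cons : Char → Bool → Kids → Kids → Kids
deriving Repr

-- node.get(s[j])
def lookupCh : Char → Kids → Option (Bool × Kids)
  | _, .nil => none
  | c, .cons d bt kt rest => if c = d then some (bt, kt) else lookupCh c rest

-- write (or append) the child for character c
def putChild : Kids → Char → Bool × Kids → Kids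
  | .nil, c, t => .cons c t.1 t.2 .nil
  | .cons d bt kt rest, c, t =>
      if c = d then .cons d t.1 t.2 rest
      else .cons d bt kt (putChild rest c t)

-- Source B's _build_trie insertion of one phrase (node.setdefault walk, then set '$')
def insertT : List Char → Bool × Kids → Bool × Kids
  | [], (_, k) => (true, k)
  | c :: p, (b, k) =>
      (b, putChild k c (insertT p ((lookupCh c k).getD (false, .nil))))

-- the inner while-loop of Source B: from this node, does some phrase end along the input?
def acceptsT : Bool × Kids → List Char → Bool
  | (b, _), [] => b
  | (b, k), c :: r =>
      b || (match lookupCh c k with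
            | some t => acceptsT t r
            | none => false)

-- _build_trie over the phrase list
def buildTrie (ps : List (List Char)) : Bool × Kids :=
  ps.foldl (fun t p => insertT p t) (false, .nil)

def loopTrie : Bool × Kids :=
  buildTrie
    ["would you like me to".toList,
     "ask me about".toList,
     "i can help you with".toList,
     "just ask".toList,
     "how can i help".toList,
     "want to know more".toList]

-- the outer for-loop of Source B: try the trie at every start position i = 0..n
def scanTrie (t : Bool × Kids) : List Char → Bool
  | [] => acceptsT t []
  | c :: r => acceptsT t (c :: r) || scanTrie t r

def check_for_loops_alt (answer : String) : Bool :=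
  scanTrie loopTrie (PySem.Chars.lower answer.toList)

-- ===== PRECONDITION & SPEC =====
def Spec_check_for_loops (answer : String) (out : Bool) : Prop := out = check_for_loops_alt answer
instance (answer : String) (out : Bool) : Decidable (Spec_check_for_loops answer out) := by unfold Spec_check_for_loops; infer_instance

-- ===== CLAIM (what is proved, stated in full; the proofs are below) =====
def Claim_equal_check_for_loops : Prop := ∀ (answer : String), Dom_check_for_loops answer → Spec_check_for_loops answer (check_for_loops answer)

-- ===== LEMMAS AND PROOFS =====

theorem empty_accepts (l : List Char) : acceptsT (false, .nil) l = false := by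
  cases l <;> simp [acceptsT, lookupCh]

theorem lookup_putChild (d c : Char) (t : Bool × Kids) (k : Kids) :
    lookupCh d (putChild k c t) = if d = c then some t else lookupCh d k := by
  induction k with
  | nil => simp [putChild, lookupCh]
  | cons e bt kt rest ihkt ihrest =>
      by_cases hce : c = e
      · subst hce
        by_cases hdc : d = c <;> simp [putChild, lookupCh, hdc]
      · simp only [putChild, if_neg hce, lookupCh, ihrest]
        by_cases hde : d = e
        · subst hde
          simp [if_neg (fun h => hce (Eq.symm h))]
        · simp [hde]

theorem accepts_insert (p : List Char) (t : Bool × Kids) (l : List Char) :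
    acceptsT (insertT p t) l = (p.isPrefixOf l || acceptsT t l) := by
  induction p generalizing t l with
  | nil =>
      obtain ⟨b, k⟩ := t
      cases l <;> simp [insertT, acceptsT, List.isPrefixOf]
  | cons c p' ih =>
      obtain ⟨b, k⟩ := t
      cases l with
      | nil => simp [insertT, acceptsT, List.isPrefixOf]
      | cons d r =>
          simp only [insertT, acceptsT, lookup_putChild, List.isPrefixOf]
          by_cases hdc : d = c
          · subst hdc
            cases hlk : lookupCh d k with
            | none => simp [ih, empty_accepts, Bool.or_comm]
            | some t0 => simp [ih, Bool.or_comm, Bool.or_assoc]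
          · have hbeq : (c == d) = false := by
              simp only [beq_eq_false_iff_ne, ne_eq]
              exact fun h => hdc (Eq.symm h)
            simp [hdc, hbeq]

theorem accepts_build (ps : List (List Char)) (t : Bool × Kids) (l : List Char) :
    acceptsT (ps.foldl (fun t p => insertT p t) t) l
      = (ps.any (fun p => p.isPrefixOf l) || acceptsT t l) := by
  induction ps generalizing t with
  | nil => simp
  | cons p ps ih =>
      simp only [List.foldl, List.any_cons, ih, accepts_insert]
      cases p.isPrefixOf l <;> simp

theorem scanTrie_eq_true_iff (t : Bool × Kids) (l : List Char) :
    scanTrie t l = true ↔ ∃ j, acceptsT t (l.drop j) = true := by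
  induction l with
  | nil =>
      simp only [scanTrie]
      constructor
      · intro h; exact ⟨0, h⟩
      · rintro ⟨j, hj⟩; simpa using hj
  | cons c r ih =>
      simp only [scanTrie, Bool.or_eq_true, ih]
      constructor
      · rintro (h | ⟨j, hj⟩)
        · exact ⟨0, by simpa using h⟩
        · exact ⟨j + 1, by simpa using hj⟩
      · rintro ⟨j, hj⟩
        cases j with
        | zero => exact Or.inl (by simpa using hj)
        | succ j => exact Or.inr ⟨j, by simpa using hj⟩

-- the heart: the trie scan equals A's six 'phrase in s' tests, for any lowered string
theorem scan_eq_any (l : List Char) :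
    scanTrie loopTrie l
      = (["would you like me to".toList,
          "ask me about".toList,
          "i can help you with".toList,
          "just ask".toList,
          "how can i help".toList,
          "want to know more".toList].any (fun p => PySem.Chars.isIn p l)) := by
  rw [Bool.eq_iff_iff]
  rw [scanTrie_eq_true_iff]
  simp only [loopTrie, buildTrie, accepts_build, empty_accepts, Bool.or_false,
    List.any_eq_true]
  constructor
  · rintro ⟨j, p, hp, hpref⟩
    exact ⟨p, hp, (PySem.Chars.exists_prefix_drop_iff_isIn p l).mp
      ⟨j, List.isPrefixOf_iff_prefix.mp hpref⟩⟩
  · rintro ⟨p, hp, hin⟩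
    obtain ⟨j, hj⟩ := (PySem.Chars.exists_prefix_drop_iff_isIn p l).mpr hin
    exact ⟨j, p, hp, List.isPrefixOf_iff_prefix.mpr hj⟩

-- ===== VERDICT (by name: the statement is the Claim_ definition above) =====
theorem check_for_loops_spec : Claim_equal_check_for_loops := by
  intro answer _
  unfold Spec_check_for_loops check_for_loops check_for_loops_alt
  rw [scan_eq_any]
  simp [PySem.Str.isIn_eq, PySem.Str.toList_lower]
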